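-- pv_equiv track=rewrite | github.com/roddarjohn/kiln | src/be/operations/resource_registry.py | _format_imports
-- ===== SOURCE A (Python) =====
-- def _format_imports(imports: list[tuple[str, str]]) -> list[str]:
--     """Group ``(module, name)`` pairs into ``from X import a, b, c`` lines.
--
--     Stable ordering (sorted by module then alias) keeps the
--     generated file diff-stable under regen.  Aliases (``"X as Y"``)
--     are passed through verbatim so callers can disambiguate
--     per-app ``LINKS`` symbols.
--     """
--     grouped: dict[str, list[str]] = {}
--
--     for module, name in imports:
--         grouped.setdefault(module, []).append(name)
--
--     lines: list[str] = []
--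
--     for module in sorted(grouped):
--         names = sorted(set(grouped[module]))
--         joined = ", ".join(names)
--         lines.append(f"from {module} import {joined}")
--
--     return lines
-- ===== SOURCE B (Python) =====
-- def _format_imports(imports: list[tuple[str, str]]) -> list[str]:
--     modules = sorted({m for m, _ in imports})
--     return [
--         "from {} import {}".format(
--             m, ", ".join(sorted({n for mm, n in imports if mm == m}))
--         )
--         for m in modules
--     ]
-- ===== Notes on version B (the rewrite author's own statement) =====
-- stated objective: simpler
-- what changed: Replaces the dict-grouping pass (setdefault/append then per-key re-sort) with a dict-free nested comprehension: sort the distinct modules once, then build each line by filtering that module's names directly from the input.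
import Mathlib
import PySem

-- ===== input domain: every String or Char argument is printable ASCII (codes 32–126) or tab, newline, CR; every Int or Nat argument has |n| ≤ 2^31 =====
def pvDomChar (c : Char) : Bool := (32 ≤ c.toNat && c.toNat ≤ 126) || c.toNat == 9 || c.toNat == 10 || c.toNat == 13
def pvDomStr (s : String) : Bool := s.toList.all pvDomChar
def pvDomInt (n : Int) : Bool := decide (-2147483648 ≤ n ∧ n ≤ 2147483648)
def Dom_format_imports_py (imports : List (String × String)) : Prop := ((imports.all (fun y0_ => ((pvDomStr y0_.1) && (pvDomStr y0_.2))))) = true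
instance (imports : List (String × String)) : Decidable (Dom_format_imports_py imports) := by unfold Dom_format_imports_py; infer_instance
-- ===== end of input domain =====

-- B is a simpler, dict-free decomposition of the same task (no speed claim): equivalence of RETURN values.

-- shared helper: both Pythons format a line as f"from {module} import {', '.join(names)}"
def pvMkLine (m : String) (names : List String) : String :=
  "from " ++ m ++ " import " ++ PySem.Str.join ", " names

-- ===== PORT A =====
def format_imports_py (imports : List (String × String)) : List String :=
  -- grouped.setdefault(module, []).append(name)  ≡  grouped[module] = grouped.get(module, []) + [name]
  let grouped : PySem.Dict String (List String) :=
    imports.foldl (fun d p => d.modify p.1 [] (· ++ [p.2])) PySem.Dict.empty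
  -- for module in sorted(grouped): … ; grouped[module] never raises since module ∈ keys (getD is exact there)
  (PySem.List.sorted grouped.keys (fun x => x) false).foldl
    (fun lines m =>
      lines ++ [pvMkLine m (PySem.List.sorted (PySem.Set.ofList (grouped.getD m [])) (fun x => x) false)])
    []

-- ===== PORT B =====
def format_imports_py_alt (imports : List (String × String)) : List String :=
  let modules := PySem.List.sorted (PySem.Set.ofList (imports.map (·.1))) (fun x => x) false
  modules.map (fun m =>
    pvMkLine m (PySem.List.sorted
      (PySem.Set.ofList ((imports.filter (fun p => p.1 == m)).map (·.2))) (fun x => x) false))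

-- ===== PRECONDITION & SPEC =====
def Spec_format_imports_py (imports : List (String × String)) (out : List String) : Prop := out = format_imports_py_alt imports
instance (imports : List (String × String)) (out : List String) : Decidable (Spec_format_imports_py imports out) := by unfold Spec_format_imports_py; infer_instance

-- ===== CLAIM (what is proved, stated in full; the proofs are below) =====
def Claim_equal_format_imports_py : Prop := ∀ (imports : List (String × String)), Dom_format_imports_py imports → Spec_format_imports_py imports (format_imports_py imports)

-- ===== LEMMAS AND PROOFS =====

-- the accumulate-append loop is a map
theorem pv_foldl_append_map {α β : Type} (l : List α) (f : α → β) (a : List β) :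
    l.foldl (fun acc x => acc ++ [f x]) a = a ++ l.map f := by
  induction l generalizing a with
  | nil => simp
  | cons x xs ih => simp [List.foldl, ih]

-- ===== VERDICT (by name: the statement is the Claim_ definition above) =====
theorem format_imports_py_spec : Claim_equal_format_imports_py := by
  intro imports _
  show format_imports_py imports = format_imports_py_alt imports
  unfold format_imports_py format_imports_py_alt
  dsimp only
  have hkeys :
      (imports.foldl (fun d p => d.modify p.1 [] (· ++ [p.2]))
        (PySem.Dict.empty : PySem.Dict String (List String))).keys
        = PySem.Set.ofList (imports.map (·.1)) := by
    rw [PySem.Dict.keys_foldl_modify_key]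
    simp [PySem.Set.update_nil_left]
  rw [hkeys, pv_foldl_append_map]
  simp only [List.nil_append]
  apply List.map_congr_left
  intro m _
  have hget := PySem.Dict.getD_foldl_modify_append imports
    (PySem.Dict.empty : PySem.Dict String (List String)) m
  rw [hget]
  simp
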